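-- pv_equiv track=rewrite | github.com/pypi-data/pypi-mirror-171 | packages/basestrategy/basestrategy-0.0.3-py3-none-any.whl/myutils/trade_utilities.py | get_strike_range
-- ===== SOURCE A (Python) =====
-- def get_strike_range(expiry_day: str, today_day: str, strike_gap):
--     expiry_day = expiry_day.capitalize()
--     today_day = today_day.capitalize()
--
--     expiry_days = ["Thursday", "Wednesday", "Tuesday", "Monday", "Friday"]
--     index = expiry_days.index(expiry_day)
--
--     loop_keys = expiry_days[index:]
--     strike_price = 0
--
--     new_dict = {}
--     for i in loop_keys:
--         new_dict[i] = strike_price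
--         strike_price += strike_gap
--
--     if(today_day in new_dict):
--         return new_dict[today_day]
--     else:
--         return 0
-- ===== SOURCE B (Python) =====
-- def get_strike_range(expiry_day: str, today_day: str, strike_gap):
--     days = ["Thursday", "Wednesday", "Tuesday", "Monday", "Friday"]
--     e = expiry_day.capitalize()
--     t = today_day.capitalize()
--     i = days.index(e)
--     if t not in days:
--         return 0
--     diff = days.index(t) - i
--     return diff * strike_gap if diff >= 0 else 0
-- ===== Notes on version B (the rewrite author's own statement) =====
-- stated objective: simpler
-- what changed: Replaces the dict built in an accumulation loop with a closed-form index difference: offset = (index(today)-index(expiry))*strike_gap when nonnegative, else 0.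
import Mathlib
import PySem

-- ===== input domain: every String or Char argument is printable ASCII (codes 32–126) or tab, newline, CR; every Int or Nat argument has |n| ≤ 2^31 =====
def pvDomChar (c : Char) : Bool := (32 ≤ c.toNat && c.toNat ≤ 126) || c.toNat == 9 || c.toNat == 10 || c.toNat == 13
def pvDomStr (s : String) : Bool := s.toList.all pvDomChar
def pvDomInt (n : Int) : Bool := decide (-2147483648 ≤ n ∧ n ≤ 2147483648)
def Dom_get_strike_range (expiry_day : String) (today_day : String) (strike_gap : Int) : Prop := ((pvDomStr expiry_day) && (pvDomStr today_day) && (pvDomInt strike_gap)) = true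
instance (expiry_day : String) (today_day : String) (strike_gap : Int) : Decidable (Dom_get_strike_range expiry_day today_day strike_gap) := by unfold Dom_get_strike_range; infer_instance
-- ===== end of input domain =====

-- B replaces A's dict-building accumulation loop by a closed-form index difference (simpler, no dict).

-- str.capitalize(): first char uppercased, rest lowercased; exact on the ASCII domain
def pyCapitalize (s : String) : String :=
  match s.toList with
  | [] => s
  | c :: rest => String.ofList (PySem.Chars.upperChar c :: rest.map PySem.Chars.lowerChar)

def pvDays : List String := ["Thursday", "Wednesday", "Tuesday", "Monday", "Friday"]

-- ===== PORT A =====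
def get_strike_range (expiry_day : String) (today_day : String) (strike_gap : Int) : Int :=
  let expiry_day := pyCapitalize expiry_day
  let today_day := pyCapitalize today_day
  let expiry_days := pvDays
  match PySem.List.index? expiry_days expiry_day with      -- .index; none = ValueError (excluded by Pre_)
  | none => 0
  | some index =>
    let loop_keys := expiry_days.drop index                -- expiry_days[index:], index ≥ 0 in range
    let st := loop_keys.foldl
      (fun (st : PySem.Dict String Int × Int) i => (st.1.insert i st.2, st.2 + strike_gap))
      (PySem.Dict.empty, 0)
    let new_dict := st.1
    if new_dict.contains today_day then new_dict.getD today_day 0 else 0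

-- ===== PORT B =====
def get_strike_range_alt (expiry_day : String) (today_day : String) (strike_gap : Int) : Int :=
  let days := pvDays
  let e := pyCapitalize expiry_day
  let t := pyCapitalize today_day
  match PySem.List.index? days e with      -- .index; none = ValueError (excluded by Pre_)
  | none => 0
  | some i =>
    if ¬ (t ∈ days) then 0
    else
      let diff : Int := ((PySem.List.index? days t).getD 0 : Int) - (i : Int)
      if diff ≥ 0 then diff * strike_gap else 0

-- ===== PRECONDITION & SPEC =====
-- Pre_ excludes exactly the inputs on which A raises ValueError (capitalized expiry_day not a listed weekday)
def Pre_get_strike_range (expiry_day : String) (today_day : String) (strike_gap : Int) : Prop :=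
  pyCapitalize expiry_day ∈ pvDays
instance (expiry_day : String) (today_day : String) (strike_gap : Int) : Decidable (Pre_get_strike_range expiry_day today_day strike_gap) := by unfold Pre_get_strike_range; infer_instance
def pvWitness_get_strike_range : String × String × Int := ("monday", "friday", 50)

def Spec_get_strike_range (expiry_day : String) (today_day : String) (strike_gap : Int) (out : Int) : Prop := out = get_strike_range_alt expiry_day today_day strike_gap
instance (expiry_day : String) (today_day : String) (strike_gap : Int) (out : Int) : Decidable (Spec_get_strike_range expiry_day today_day strike_gap out) := by unfold Spec_get_strike_range; infer_instance

-- ===== CLAIM (what is proved, stated in full; the proofs are below) =====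
def Claim_equal_get_strike_range : Prop := ∀ (expiry_day : String) (today_day : String) (strike_gap : Int), Dom_get_strike_range expiry_day today_day strike_gap → Pre_get_strike_range expiry_day today_day strike_gap → Spec_get_strike_range expiry_day today_day strike_gap (get_strike_range expiry_day today_day strike_gap)

-- ===== LEMMAS AND PROOFS =====

-- core lemma with the two capitalized strings abstracted: for e in the list, A's dict value equals B's formula
set_option maxHeartbeats 1000000 in
theorem pv_core (e t : String) (g : Int) (he : e ∈ pvDays) :
    (match PySem.List.index? pvDays e with
      | none => (0 : Int)
      | some index =>
        let st := (pvDays.drop index).foldl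
          (fun (st : PySem.Dict String Int × Int) i => (st.1.insert i st.2, st.2 + g))
          (PySem.Dict.empty, 0)
        if st.1.contains t then st.1.getD t 0 else 0)
    = (match PySem.List.index? pvDays e with
       | none => (0 : Int)
       | some i =>
         if ¬ (t ∈ pvDays) then 0
         else
          let diff : Int := ((PySem.List.index? pvDays t).getD 0 : Int) - (i : Int)
          if diff ≥ 0 then diff * g else 0) := by
  fin_cases he <;>
    simp only [pvDays, PySem.List.index?, List.idxOf?, List.findIdx?, List.findIdx?.go,
      List.drop, List.foldl, beq_iff_eq, reduceIte] <;>
    simp only [PySem.Dict.contains_insert, PySem.Dict.getD_insert, PySem.Dict.contains_empty,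
      PySem.Dict.getD_empty, List.mem_cons, List.not_mem_nil, or_false, beq_iff_eq,
      Bool.or_eq_true] <;>
    by_cases h1 : t = "Thursday" <;> by_cases h2 : t = "Wednesday" <;> by_cases h3 : t = "Tuesday" <;>
    by_cases h4 : t = "Monday" <;> by_cases h5 : t = "Friday" <;>
    simp_all <;>
    (try simp_all [PySem.Dict.contains_insert, PySem.Dict.getD_insert, PySem.Dict.contains_empty,
      PySem.Dict.getD_empty]) <;> (try ring)

-- ===== VERDICT (by name: the statement is the Claim_ definition above) =====
theorem get_strike_range_spec : Claim_equal_get_strike_range := by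
  intro e t g _ hpre
  unfold Spec_get_strike_range get_strike_range get_strike_range_alt
  exact pv_core (pyCapitalize e) (pyCapitalize t) g hpre
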